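-- pv_equiv track=rewrite | github.com/OMSI-Dev/NatSci | SOS/Utility Scripts/2_index_generate.py | parse_playlist_file
-- ===== SOURCE A (Python) =====
-- def parse_playlist_file(playlist_content):
--     """
--     Parse playlist.sos file content to extract name and slide numbers.
--
--     Args:
--         playlist_content: Content of playlist.sos file as string
--
--     Returns:
--         dict: Dictionary with name and slide_numbers
--     """
--     result = {
--         'name': '',
--         'slide_numbers': ''
--     }
--
--     for line in playlist_content.split('\n'):
--         line = line.strip()
--         if not line or line.startswith('#'):
--             continue
--
--         # Split on first '=' only
--         if '=' in line:
--             key, value = line.split('=', 1)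
--             key = key.strip()
--             value = value.strip()
--
--             # Extract only name and slide_numbers
--             if key == 'name':
--                 result['name'] = value
--             elif key == 'slide_numbers':
--                 result['slide_numbers'] = value
--
--     return result
-- ===== SOURCE B (Python) =====
-- def parse_playlist_file(playlist_content):
--     """
--     Parse playlist.sos file content to extract name and slide numbers.
--
--     Instead of one forward pass mutating a result dict, run an
--     independent backward scan per requested key: the FIRST match seen
--     when walking the lines from the END is exactly the last assignment,
--     so each scan can stop early; '' if the key never appears.
--     """
--     def find_last(key):
--         for line in reversed(playlist_content.split('\n')):
--             line = line.strip()
--             if not line or line.startswith('#') or '=' not in line: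
--                 continue
--             k, v = line.split('=', 1)
--             if k.strip() == key:
--                 return v.strip()
--         return ''
--     return {'name': find_last('name'),
--             'slide_numbers': find_last('slide_numbers')}
-- ===== Notes on version B (the rewrite author's own statement) =====
-- stated objective: alternative
-- what changed: Replaces A's single forward pass that mutates a two-key result dict by two independent backward scans, one per requested key, each returning the first match seen from the end (= the last assignment) and stopping early; no dict is built.
import Mathlib
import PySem

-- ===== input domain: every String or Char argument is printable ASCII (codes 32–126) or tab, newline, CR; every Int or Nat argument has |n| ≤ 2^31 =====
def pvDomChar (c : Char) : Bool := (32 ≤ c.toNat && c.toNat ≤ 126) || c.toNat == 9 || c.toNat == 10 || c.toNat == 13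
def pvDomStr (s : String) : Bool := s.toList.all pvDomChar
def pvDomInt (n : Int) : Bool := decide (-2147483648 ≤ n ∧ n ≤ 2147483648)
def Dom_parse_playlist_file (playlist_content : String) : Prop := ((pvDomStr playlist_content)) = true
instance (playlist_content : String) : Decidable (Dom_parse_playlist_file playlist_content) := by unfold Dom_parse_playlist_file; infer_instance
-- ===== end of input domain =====

-- B replaces A's forward pass mutating a two-key dict by two independent backward scans, one per key, each returning the first match from the end (= the last assignment), with early exit.

-- A's loop body, named so the proofs can speak about one step.
def pvStepA (result : PySem.Dict String String) (line : String) : PySem.Dict String String :=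
  let line := PySem.Str.strip line
  if PySem.Str.len line = 0 || PySem.Str.startswith line "#" then result
  else if PySem.Str.isIn "=" line then
    match PySem.Str.splitMax? line "=" 1 with
    | some [key, value] =>
      let key := PySem.Str.strip key
      let value := PySem.Str.strip value
      if key = "name" then result.insert "name" value
      else if key = "slide_numbers" then result.insert "slide_numbers" value
      else result
    | _ => result   -- unreachable: split(sep, 1) with '=' in line yields 2 parts; totality guard
  else result

-- ===== PORT A =====
def parse_playlist_file (playlist_content : String) : List (String × String) :=
  let init : PySem.Dict String String :=
    PySem.Dict.ofList [("name", ""), ("slide_numbers", "")]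
  -- split? is always `some` here since the separator "\n" ≠ ""
  let result := ((PySem.Str.split? playlist_content "\n").getD []).foldl pvStepA init
  result.items

-- B's inner `find_last` loop: walk the (already reversed) lines, return the first
-- stripped value whose stripped key matches; '' when the scan is exhausted.
def pvFindLast (key : String) : List String → String
  | [] => ""
  | l :: rest =>
    let s := PySem.Str.strip l
    if PySem.Str.len s = 0 || PySem.Str.startswith s "#" || !(PySem.Str.isIn "=" s) then
      pvFindLast key rest
    else
      match PySem.Str.splitMax? s "=" 1 with
      | some [k, v] =>
          if PySem.Str.strip k = key then PySem.Str.strip v else pvFindLast key rest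
      | _ => pvFindLast key rest   -- unreachable: '=' is in s; totality guard

-- ===== PORT B =====
def parse_playlist_file_alt (playlist_content : String) : List (String × String) :=
  -- split? is always `some` here since the separator "\n" ≠ ""
  let revLines := ((PySem.Str.split? playlist_content "\n").getD []).reverse
  [("name", pvFindLast "name" revLines),
   ("slide_numbers", pvFindLast "slide_numbers" revLines)]

-- ===== PRECONDITION & SPEC =====
def Spec_parse_playlist_file (playlist_content : String) (out : List (String × String)) : Prop := out = parse_playlist_file_alt playlist_content
instance (playlist_content : String) (out : List (String × String)) : Decidable (Spec_parse_playlist_file playlist_content out) := by unfold Spec_parse_playlist_file; infer_instance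

-- ===== CLAIM (what is proved, stated in full; the proofs are below) =====
def Claim_equal_parse_playlist_file : Prop := ∀ (playlist_content : String), Dom_parse_playlist_file playlist_content → Spec_parse_playlist_file playlist_content (parse_playlist_file playlist_content)

-- ===== LEMMAS AND PROOFS =====

-- the key=value entry a line contributes, none for skipped lines (proof-side view of both loops)
def pvEntryB (line : String) : Option (String × String) :=
  let stripped := PySem.Str.strip line
  if ¬ (PySem.Str.len stripped = 0) ∧ ¬ (PySem.Str.startswith stripped "#" = true)
      ∧ PySem.Str.isIn "=" stripped = true then
    match PySem.Str.splitMax? stripped "=" 1 with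
    | some [k, v] => some (k, v)
    | _ => none
  else none

-- last-wins lookup with default: the accumulator view of building a dict by repeated insert
def pvLastD (ps : List (String × String)) (k d : String) : String :=
  ps.foldl (fun acc p => if k = p.1 then p.2 else acc) d

-- first-match lookup with default: the view of B's early-exit scan
def pvFirstD (k d : String) : List (String × String) → String
  | [] => d
  | p :: ps => if k = p.1 then p.2 else pvFirstD k d ps

theorem pvLastD_cons (p : String × String) (ps : List (String × String)) (k d : String) :
    pvLastD (p :: ps) k d = pvLastD ps k (if k = p.1 then p.2 else d) := rfl

-- a skipped line leaves A's dict unchanged and is no entry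
theorem pvStepA_skip (d : PySem.Dict String String) (l : String)
    (h : PySem.Str.len (PySem.Str.strip l) = 0 ∨ PySem.Str.startswith (PySem.Str.strip l) "#" = true
         ∨ PySem.Str.isIn "=" (PySem.Str.strip l) = false
         ∨ ∀ k v, PySem.Str.splitMax? (PySem.Str.strip l) "=" 1 ≠ some [k, v]) :
    pvStepA d l = d := by
  simp only [pvStepA]
  rcases h with h | h | h | h
  · simp at h; simp [h]
  · simp at h; simp [h]
  · simp at h; simp [h]
  · cases hsp : PySem.Str.splitMax? (PySem.Str.strip l) "=" 1 with
    | none => simp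
    | some parts =>
        match parts with
        | [] => simp
        | [_] => simp
        | [k, v] => exact absurd hsp (h k v)
        | _ :: _ :: _ :: _ => simp

theorem pvEntryB_skip (l : String)
    (h : PySem.Str.len (PySem.Str.strip l) = 0 ∨ PySem.Str.startswith (PySem.Str.strip l) "#" = true
         ∨ PySem.Str.isIn "=" (PySem.Str.strip l) = false
         ∨ ∀ k v, PySem.Str.splitMax? (PySem.Str.strip l) "=" 1 ≠ some [k, v]) :
    pvEntryB l = none := by
  simp only [pvEntryB]
  rcases h with h | h | h | h
  · simp at h; simp [h]
  · simp at h; simp [h]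
  · simp at h; simp [h]
  · cases hsp : PySem.Str.splitMax? (PySem.Str.strip l) "=" 1 with
    | none => simp
    | some parts =>
        match parts with
        | [] => simp
        | [_] => simp
        | [k, v] => exact absurd hsp (h k v)
        | _ :: _ :: _ :: _ => simp

theorem pvFindLast_skip (key l : String) (rest : List String)
    (h : PySem.Str.len (PySem.Str.strip l) = 0 ∨ PySem.Str.startswith (PySem.Str.strip l) "#" = true
         ∨ PySem.Str.isIn "=" (PySem.Str.strip l) = false
         ∨ ∀ k v, PySem.Str.splitMax? (PySem.Str.strip l) "=" 1 ≠ some [k, v]) :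
    pvFindLast key (l :: rest) = pvFindLast key rest := by
  simp only [pvFindLast]
  rcases h with h | h | h | h
  · simp at h; simp [h]
  · simp at h; simp [h]
  · simp at h; simp [h]
  · cases hsp : PySem.Str.splitMax? (PySem.Str.strip l) "=" 1 with
    | none => split <;> simp
    | some parts =>
        match parts with
        | [] => split <;> simp
        | [_] => split <;> simp
        | [k, v] => exact absurd hsp (h k v)
        | _ :: _ :: _ :: _ => split <;> simp

-- a key=value line: A's conditional assignment, the entry, B's test
theorem pvStepA_kv (d : PySem.Dict String String) (l k v : String)
    (hne : ¬ PySem.Str.len (PySem.Str.strip l) = 0)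
    (hhash : PySem.Str.startswith (PySem.Str.strip l) "#" = false)
    (heq : PySem.Str.isIn "=" (PySem.Str.strip l) = true)
    (hsp : PySem.Str.splitMax? (PySem.Str.strip l) "=" 1 = some [k, v]) :
    pvStepA d l =
      if PySem.Str.strip k = "name" then d.insert "name" (PySem.Str.strip v)
      else if PySem.Str.strip k = "slide_numbers" then d.insert "slide_numbers" (PySem.Str.strip v)
      else d := by
  simp only [pvStepA, hsp]
  simp at hne hhash heq
  simp [hne, hhash, heq]

theorem pvEntryB_kv (l k v : String)
    (hne : ¬ PySem.Str.len (PySem.Str.strip l) = 0)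
    (hhash : PySem.Str.startswith (PySem.Str.strip l) "#" = false)
    (heq : PySem.Str.isIn "=" (PySem.Str.strip l) = true)
    (hsp : PySem.Str.splitMax? (PySem.Str.strip l) "=" 1 = some [k, v]) :
    pvEntryB l = some (k, v) := by
  simp only [pvEntryB, hsp]
  simp at hne hhash heq
  simp [hne, hhash, heq]

theorem pvFindLast_kv (key l k v : String) (rest : List String)
    (hne : ¬ PySem.Str.len (PySem.Str.strip l) = 0)
    (hhash : PySem.Str.startswith (PySem.Str.strip l) "#" = false)
    (heq : PySem.Str.isIn "=" (PySem.Str.strip l) = true)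
    (hsp : PySem.Str.splitMax? (PySem.Str.strip l) "=" 1 = some [k, v]) :
    pvFindLast key (l :: rest) =
      if PySem.Str.strip k = key then PySem.Str.strip v else pvFindLast key rest := by
  simp only [pvFindLast, hsp]
  simp at hne hhash heq
  simp [hne, hhash, heq]

-- inserting one of the two fixed keys updates the two-key literal dict in place
theorem pvInsert_name (x y v : String) :
    (PySem.Dict.ofList [("name", x), ("slide_numbers", y)]).insert "name" v
      = PySem.Dict.ofList [("name", v), ("slide_numbers", y)] := by
  apply PySem.Dict.ext
  rw [PySem.Dict.items_insert_of_contains]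
  · rfl
  · rfl

theorem pvInsert_slide (x y v : String) :
    (PySem.Dict.ofList [("name", x), ("slide_numbers", y)]).insert "slide_numbers" v
      = PySem.Dict.ofList [("name", x), ("slide_numbers", v)] := by
  apply PySem.Dict.ext
  rw [PySem.Dict.items_insert_of_contains]
  · rfl
  · rfl

-- A's loop invariant: the fold over any lines, started at the two-key dict, has items
-- given by last-wins over the stripped entries
theorem pvMain (lines : List String) (x y : String) :
    (lines.foldl pvStepA (PySem.Dict.ofList [("name", x), ("slide_numbers", y)])).items
      = [("name", pvLastD ((lines.filterMap pvEntryB).map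
            (fun kv => (PySem.Str.strip kv.1, PySem.Str.strip kv.2))) "name" x),
         ("slide_numbers", pvLastD ((lines.filterMap pvEntryB).map
            (fun kv => (PySem.Str.strip kv.1, PySem.Str.strip kv.2))) "slide_numbers" y)] := by
  induction lines generalizing x y with
  | nil => rfl
  | cons l ls ih =>
      simp only [List.foldl_cons, List.filterMap_cons]
      by_cases h1 : PySem.Str.len (PySem.Str.strip l) = 0
      · rw [pvStepA_skip _ _ (Or.inl h1), pvEntryB_skip _ (Or.inl h1), ih]
      by_cases h2 : PySem.Str.startswith (PySem.Str.strip l) "#" = true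
      · rw [pvStepA_skip _ _ (Or.inr (Or.inl h2)), pvEntryB_skip _ (Or.inr (Or.inl h2)), ih]
      by_cases h3 : PySem.Str.isIn "=" (PySem.Str.strip l) = true
      case neg =>
        have h3' := Bool.eq_false_iff.mpr h3
        rw [pvStepA_skip _ _ (Or.inr (Or.inr (Or.inl h3'))),
            pvEntryB_skip _ (Or.inr (Or.inr (Or.inl h3'))), ih]
      cases hsp : PySem.Str.splitMax? (PySem.Str.strip l) "=" 1 with
      | none =>
          have hno : ∀ k v, PySem.Str.splitMax? (PySem.Str.strip l) "=" 1 ≠ some [k, v] := by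
            intro k v h; rw [hsp] at h; simp at h
          rw [pvStepA_skip _ _ (Or.inr (Or.inr (Or.inr hno))),
              pvEntryB_skip _ (Or.inr (Or.inr (Or.inr hno))), ih]
      | some parts =>
          have h2' := Bool.eq_false_iff.mpr h2
          match parts with
          | [] | [_] | _ :: _ :: _ :: _ =>
              have hno : ∀ k v, PySem.Str.splitMax? (PySem.Str.strip l) "=" 1 ≠ some [k, v] := by
                intro k v h; rw [hsp] at h; simp at h
              rw [pvStepA_skip _ _ (Or.inr (Or.inr (Or.inr hno))),
                  pvEntryB_skip _ (Or.inr (Or.inr (Or.inr hno))), ih]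
          | [k, v] =>
              rw [pvStepA_kv _ _ _ _ h1 h2' h3 hsp, pvEntryB_kv _ _ _ h1 h2' h3 hsp]
              simp only [List.map_cons, pvLastD_cons]
              by_cases hk1 : PySem.Str.strip k = "name"
              · rw [if_pos hk1, pvInsert_name, ih, hk1]
                simp
              by_cases hk2 : PySem.Str.strip k = "slide_numbers"
              case neg =>
                rw [if_neg hk1, if_neg hk2, ih]
                simp [Ne.symm hk1, Ne.symm hk2]
              rw [if_neg hk1, if_pos hk2, pvInsert_slide, ih, hk2]
              simp

-- B's scan invariant: pvFindLast over any lines is first-match over their stripped entries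
theorem pvFindLast_entries (key : String) (lines : List String) :
    pvFindLast key lines
      = pvFirstD key "" ((lines.filterMap pvEntryB).map
          (fun kv => (PySem.Str.strip kv.1, PySem.Str.strip kv.2))) := by
  induction lines with
  | nil => rfl
  | cons l ls ih =>
      simp only [List.filterMap_cons]
      by_cases h1 : PySem.Str.len (PySem.Str.strip l) = 0
      · rw [pvFindLast_skip _ _ _ (Or.inl h1), pvEntryB_skip _ (Or.inl h1), ih]
      by_cases h2 : PySem.Str.startswith (PySem.Str.strip l) "#" = true
      · rw [pvFindLast_skip _ _ _ (Or.inr (Or.inl h2)), pvEntryB_skip _ (Or.inr (Or.inl h2)), ih]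
      by_cases h3 : PySem.Str.isIn "=" (PySem.Str.strip l) = true
      case neg =>
        have h3' := Bool.eq_false_iff.mpr h3
        rw [pvFindLast_skip _ _ _ (Or.inr (Or.inr (Or.inl h3'))),
            pvEntryB_skip _ (Or.inr (Or.inr (Or.inl h3'))), ih]
      cases hsp : PySem.Str.splitMax? (PySem.Str.strip l) "=" 1 with
      | none =>
          have hno : ∀ k v, PySem.Str.splitMax? (PySem.Str.strip l) "=" 1 ≠ some [k, v] := by
            intro k v h; rw [hsp] at h; simp at h
          rw [pvFindLast_skip _ _ _ (Or.inr (Or.inr (Or.inr hno))),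
              pvEntryB_skip _ (Or.inr (Or.inr (Or.inr hno))), ih]
      | some parts =>
          have h2' := Bool.eq_false_iff.mpr h2
          match parts with
          | [] | [_] | _ :: _ :: _ :: _ =>
              have hno : ∀ k v, PySem.Str.splitMax? (PySem.Str.strip l) "=" 1 ≠ some [k, v] := by
                intro k v h; rw [hsp] at h; simp at h
              rw [pvFindLast_skip _ _ _ (Or.inr (Or.inr (Or.inr hno))),
                  pvEntryB_skip _ (Or.inr (Or.inr (Or.inr hno))), ih]
          | [k, v] =>
              rw [pvFindLast_kv _ _ _ _ _ h1 h2' h3 hsp, pvEntryB_kv _ _ _ h1 h2' h3 hsp]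
              simp only [List.map_cons, pvFirstD, ih]
              by_cases hk : PySem.Str.strip k = key
              · simp [hk]
              · simp [hk, Ne.symm hk]

theorem pvFirstD_append_single (k d : String) (qs : List (String × String)) (p : String × String) :
    pvFirstD k d (qs ++ [p]) = pvFirstD k (if k = p.1 then p.2 else d) qs := by
  induction qs with
  | nil => rfl
  | cons q qs ih => simp only [List.cons_append, pvFirstD, ih]

-- last-wins over a list = first-match over its reverse
theorem pvLastD_eq_firstD_reverse (ps : List (String × String)) (k d : String) :
    pvLastD ps k d = pvFirstD k d ps.reverse := by
  induction ps generalizing d with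
  | nil => rfl
  | cons p ps ih =>
      rw [pvLastD_cons, List.reverse_cons, pvFirstD_append_single, ih]

-- ===== VERDICT (by name: the statement is the Claim_ definition above) =====
theorem parse_playlist_file_spec : Claim_equal_parse_playlist_file := by
  intro pc _
  show parse_playlist_file pc = parse_playlist_file_alt pc
  simp only [parse_playlist_file, parse_playlist_file_alt, pvMain, pvFindLast_entries,
    List.filterMap_reverse, List.map_reverse, ← pvLastD_eq_firstD_reverse]
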